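-- pv_equiv track=rewrite | github.com/HanSeokhyeon/Baekjoon-Online-Judge | Chapter8_수학1/2775_president_of_woman's_society.py | apt_iter
-- ===== SOURCE A (Python) =====
-- def apt_iter(k, n):
--     floor = list(range(1, n+1))
--     for i in range(k-1):
--         sum_n = 0
--         next_floor = []
--         for j in floor:
--             sum_n += j
--             next_floor.append(sum_n)
--         floor = next_floor
--     return sum(floor)
-- ===== SOURCE B (Python) =====
-- def apt_iter(k, n):
--     # closed form: result = C(n + max(k,1), max(k,1) + 1), computed by an exact product loop
--     if n <= 0:
--         return 0
--     kk = k if k > 1 else 1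
--     res = 1
--     for i in range(1, kk + 2):
--         res = res * (n - 1 + i) // i
--     return res
-- ===== Notes on version B (the rewrite author's own statement) =====
-- stated objective: faster
-- what changed: Replaces the k-1 repeated prefix-sum passes over a length-n list with a closed-form binomial coefficient C(n+max(k,1), max(k,1)+1) computed by a single exact product loop.
import Mathlib
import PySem

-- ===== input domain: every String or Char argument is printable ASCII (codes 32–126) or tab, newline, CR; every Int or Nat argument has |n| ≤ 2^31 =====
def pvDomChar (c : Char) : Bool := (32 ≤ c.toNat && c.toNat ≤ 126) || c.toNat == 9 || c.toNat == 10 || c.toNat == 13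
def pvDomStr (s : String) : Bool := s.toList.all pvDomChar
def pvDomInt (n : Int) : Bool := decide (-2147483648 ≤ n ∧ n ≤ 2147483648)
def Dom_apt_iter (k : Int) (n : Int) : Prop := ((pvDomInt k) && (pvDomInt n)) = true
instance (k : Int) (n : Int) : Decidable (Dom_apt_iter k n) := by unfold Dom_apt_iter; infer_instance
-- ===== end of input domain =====

-- B replaces A's k-1 repeated prefix-sum passes by a closed-form binomial coefficient
-- computed with one exact product loop (objective: faster).

-- ===== PORT A =====
-- Python's next_floor.append(x) is O(1); ported as cons onto the front plus one
-- final reverse per pass (same loop, same state) so the port evaluates in the same time.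
def apt_iter (k : Int) (n : Int) : Int :=
  let floor0 := PySem.List.pyRange 1 (n+1) 1
  let floor := (PySem.List.pyRange 0 (k-1) 1).foldl
    (fun fl _ =>
      (fl.foldl (fun (st : Int × List Int) j => (st.1 + j, (st.1 + j) :: st.2))
        ((0 : Int), ([] : List Int))).2.reverse)
    floor0
  floor.foldl (· + ·) 0

-- ===== PORT B =====
def apt_iter_alt (k : Int) (n : Int) : Int :=
  if n ≤ 0 then 0
  else
    let kk := if k > 1 then k else 1
    (PySem.List.pyRange 1 (kk+2) 1).foldl
      (fun res i => PySem.Int.floordiv (res * (n - 1 + i)) i) 1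

-- ===== PRECONDITION & SPEC =====
def Spec_apt_iter (k : Int) (n : Int) (out : Int) : Prop := out = apt_iter_alt k n
instance (k : Int) (n : Int) (out : Int) : Decidable (Spec_apt_iter k n out) := by unfold Spec_apt_iter; infer_instance

-- ===== CLAIM (what is proved, stated in full; the proofs are below) =====
def Claim_equal_apt_iter : Prop := ∀ (k : Int) (n : Int), Dom_apt_iter k n → Spec_apt_iter k n (apt_iter k n)

-- ===== LEMMAS AND PROOFS =====

/-- Proof-side description of Python's running-prefix-sum pass. -/
def pscan (s : Int) : List Int → List Int
  | [] => []
  | j :: l => (s + j) :: pscan (s + j) l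

theorem pscan_append (l : List Int) : ∀ (s x : Int),
    pscan s (l ++ [x]) = pscan s l ++ [s + l.sum + x] := by
  induction l with
  | nil => intro s x; simp [pscan]
  | cons j l ih => intro s x; simp [pscan, ih (s + j) x]; omega

theorem inner_foldl (l : List Int) : ∀ (s : Int) (acc : List Int),
    l.foldl (fun (st : Int × List Int) j => (st.1 + j, (st.1 + j) :: st.2)) (s, acc)
      = (s + l.sum, (pscan s l).reverse ++ acc) := by
  induction l with
  | nil => intro s acc; simp [pscan]
  | cons j l ih =>
    intro s acc
    simp only [List.foldl_cons, List.sum_cons, pscan, ih (s + j) ((s + j) :: acc)]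
    rw [Prod.mk.injEq]
    constructor
    · ring
    · simp [List.reverse_cons]

/-- Row after t prefix-sum passes: entry j (0-based) is C(j+1+t, t+1). -/
def Lrow (t m : Nat) : List Int :=
  (List.range m).map (fun j => ((Nat.choose (j+1+t) (t+1) : Nat) : Int))

theorem Lrow_sum (t : Nat) : ∀ (m : Nat),
    (Lrow t m).sum = ((Nat.choose (m+t+1) (t+2) : Nat) : Int) := by
  intro m
  induction m with
  | zero => simp [Lrow]
  | succ m ih =>
    have hpas : Nat.choose (m+t+1+1) (t+1+1)
        = Nat.choose (m+t+1) (t+1) + Nat.choose (m+t+1) (t+1+1) :=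
      Nat.choose_succ_succ (m+t+1) (t+1)
    simp only [Lrow, List.range_succ, List.map_append, List.map_cons, List.map_nil,
      List.sum_append, List.sum_cons, List.sum_nil] at *
    rw [ih]
    have hpas' : (m+t+1+1).choose (t+2) = (m+t+1).choose (t+1) + (m+t+1).choose (t+2) :=
      Nat.choose_succ_succ (m+t+1) (t+1)
    rw [show m+1+t = m+t+1 by omega, hpas']
    push_cast
    ring

theorem Lrow_step (t : Nat) : ∀ (m : Nat), pscan 0 (Lrow t m) = Lrow (t+1) m := by
  intro m
  induction m with
  | zero => simp [Lrow, pscan]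
  | succ m ih =>
    have h1 : Lrow t (m+1) = Lrow t m ++ [((Nat.choose (m+1+t) (t+1) : Nat) : Int)] := by
      simp [Lrow, List.range_succ]
    have h2 : Lrow (t+1) (m+1) = Lrow (t+1) m ++ [((Nat.choose (m+1+(t+1)) (t+1+1) : Nat) : Int)] := by
      simp [Lrow, List.range_succ]
    rw [h1, pscan_append, ih, Lrow_sum t m, h2]
    congr 1
    have hpas : Nat.choose (m+t+1+1) (t+1+1)
        = Nat.choose (m+t+1) (t+1) + Nat.choose (m+t+1) (t+1+1) :=
      Nat.choose_succ_succ (m+t+1) (t+1)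
    have e1 : m+1+(t+1) = m+t+1+1 := by omega
    have e2 : m+1+t = m+t+1 := by omega
    rw [e1, e2, hpas]
    push_cast
    ring_nf

theorem foldl_const_iterate {α β : Type} (l : List α) (g : β → β) :
    ∀ (s : β), l.foldl (fun s _ => g s) s = g^[l.length] s := by
  induction l with
  | nil => intro s; simp
  | cons a l ih =>
    intro s
    simp only [List.foldl_cons, List.length_cons, ih (g s)]
    rw [Function.iterate_succ_apply]

/-- One Python pass over the list equals pscan 0. -/
theorem onepass_eq (fl : List Int) :
    (fl.foldl (fun (st : Int × List Int) j => (st.1 + j, (st.1 + j) :: st.2))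
      ((0 : Int), ([] : List Int))).2.reverse = pscan 0 fl := by
  rw [inner_foldl fl 0 []]
  simp

theorem iterate_pass (m : Nat) : ∀ (t : Nat),
    (fun fl : List Int =>
      (fl.foldl (fun (st : Int × List Int) j => (st.1 + j, (st.1 + j) :: st.2))
        ((0 : Int), ([] : List Int))).2.reverse)^[t] (Lrow 0 m) = Lrow t m := by
  intro t
  induction t with
  | zero => simp
  | succ t ih =>
    rw [Function.iterate_succ_apply', ih, onepass_eq, Lrow_step]

theorem floor0_eq (n : Int) (hn : 0 < n) :
    PySem.List.pyRange 1 (n+1) 1 = Lrow 0 n.toNat := by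
  rw [PySem.List.pyRange_one]
  have : (n+1-1).toNat = n.toNat := by omega
  rw [this, Lrow]
  apply List.map_congr_left
  intro j hj
  simp [Nat.choose_one_right]
  omega

/-- A computes the binomial coefficient C(m+t+1, t+2), m = n.toNat, t = (k-1).toNat. -/
theorem apt_iter_eq_choose (k n : Int) (hn : 0 < n) :
    apt_iter k n
      = ((Nat.choose (n.toNat + (k-1).toNat + 1) ((k-1).toNat + 2) : Nat) : Int) := by
  unfold apt_iter
  simp only
  rw [floor0_eq n hn,
    foldl_const_iterate (PySem.List.pyRange 0 (k-1) 1)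
      (fun fl : List Int =>
        (fl.foldl (fun (st : Int × List Int) j => (st.1 + j, (st.1 + j) :: st.2))
          ((0 : Int), ([] : List Int))).2.reverse),
    PySem.List.length_pyRange_one]
  have : (k-1-0).toNat = (k-1).toNat := by omega
  rw [this, iterate_pass, ← List.sum_eq_foldl, Lrow_sum]

/-- A on nonpositive n: the list is empty and stays empty. -/
theorem apt_iter_nonpos (k n : Int) (hn : n ≤ 0) : apt_iter k n = 0 := by
  unfold apt_iter
  simp only
  rw [PySem.List.pyRange_one_eq_nil (by omega),
    foldl_const_iterate (PySem.List.pyRange 0 (k-1) 1)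
      (fun fl : List Int =>
        (fl.foldl (fun (st : Int × List Int) j => (st.1 + j, (st.1 + j) :: st.2))
          ((0 : Int), ([] : List Int))).2.reverse)]
  have h : ∀ t : Nat,
      (fun fl : List Int =>
        (fl.foldl (fun (st : Int × List Int) j => (st.1 + j, (st.1 + j) :: st.2))
          ((0 : Int), ([] : List Int))).2.reverse)^[t] ([] : List Int) = [] := by
    intro t
    induction t with
    | zero => simp
    | succ t ih => rw [Function.iterate_succ_apply', ih]; simp
  rw [h]
  simp

/-- B's product loop computes C(m-1+c, c) exactly (m ≥ 1). -/
theorem prod_loop_eq_choose (m : Nat) (hm : 1 ≤ m) : ∀ (c : Nat),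
    (PySem.List.pyRange 1 (1 + (c : Int)) 1).foldl
      (fun res i => PySem.Int.floordiv (res * ((m : Int) - 1 + i)) i) 1
      = ((Nat.choose (m - 1 + c) c : Nat) : Int) := by
  intro c
  induction c with
  | zero => simp [PySem.List.pyRange_one_eq_nil]
  | succ c ih =>
    have hsplit : PySem.List.pyRange 1 (1 + ((c : Int) + 1)) 1
        = PySem.List.pyRange 1 (1 + (c : Int)) 1 ++ [1 + (c : Int)] := by
      have := PySem.List.pyRange_one_succ_right (a := 1) (b := 1 + (c : Int)) (by omega)
      rw [show (1 : Int) + ((c : Int) + 1) = (1 + (c : Int)) + 1 by ring, this]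
    push_cast
    rw [hsplit, List.foldl_append, ih]
    simp only [List.foldl_cons, List.foldl_nil]
    have hnum : ((Nat.choose (m - 1 + c) c : Nat) : Int) * ((m : Int) - 1 + (1 + (c : Int)))
        = ((Nat.choose (m + c) (c + 1) * (c + 1) : Nat) : Int) := by
      have hsm : (m - 1 + c + 1) * Nat.choose (m - 1 + c) c
          = Nat.choose (m - 1 + c + 1) (c + 1) * (c + 1) := Nat.add_one_mul_choose_eq _ _
      have e : m - 1 + c + 1 = m + c := by omega
      rw [e] at hsm
      have e2 : ((m : Int) - 1 + (1 + (c : Int))) = ((m + c : Nat) : Int) := by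
        push_cast; omega
      rw [e2, ← Int.natCast_mul, Nat.mul_comm, hsm]
    rw [hnum, PySem.Int.floordiv_eq_ediv_of_pos (by omega)]
    have e1 : (1 : Int) + (c : Int) = ((c + 1 : Nat) : Int) := by push_cast; ring
    rw [e1, Int.natCast_mul, Int.mul_ediv_cancel _ (by omega)]
    have e2 : m - 1 + (c + 1) = m + c := by omega
    rw [e2]

theorem apt_iter_alt_eq_choose (k n : Int) (hn : 0 < n) :
    apt_iter_alt k n
      = ((Nat.choose (n.toNat + (k-1).toNat + 1) ((k-1).toNat + 2) : Nat) : Int) := by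
  unfold apt_iter_alt
  rw [if_neg (by omega)]
  simp only
  set kk : Int := if k > 1 then k else 1 with hkk
  have hkk1 : 1 ≤ kk := by rw [hkk]; split <;> omega
  have hc : kk + 2 = 1 + (((kk + 1).toNat : Nat) : Int) := by omega
  have hn1 : (n.toNat : Int) = n := by omega
  have hfix : ∀ (r i : Int), r * (n - 1 + i) = r * ((n.toNat : Int) - 1 + i) := by
    intro r i; rw [hn1]
  rw [hc]
  have := prod_loop_eq_choose n.toNat (by omega) (kk + 1).toNat
  rw [hn1] at this
  rw [this]
  congr 2
  · omega
  · have : (kk + 1).toNat = (k - 1).toNat + 2 := by rw [hkk]; split <;> omega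
    rw [this]

-- ===== VERDICT (by name: the statement is the Claim_ definition above) =====
theorem apt_iter_spec : Claim_equal_apt_iter := by
  intro k n _
  unfold Spec_apt_iter
  by_cases hn : n ≤ 0
  · rw [apt_iter_nonpos k n hn]
    unfold apt_iter_alt
    rw [if_pos hn]
  · rw [apt_iter_eq_choose k n (by omega), apt_iter_alt_eq_choose k n (by omega)]
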